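-- pv_equiv track=rewrite | github.com/kanade3256/Outo-made-swim_program | scripts/write_ID.py | partition_names
-- ===== SOURCE A (Python) =====
-- from typing import List
--
-- def partition_names(names: List[str]) -> List[List[str]]:
--     """
--     名前リスト（早い順）から、最終組を必ず6名にするため、
--     リストを反転（シート上で上が遅い、下が速い）し、
--     余り（r = len % 6）があればそれを1組目（上側）に、
--     残りを6名ずつのグループに分割する。
--     """
--     # 入力は早い順なので反転して遅い順にする
--     names_rev = names[::-1]
--     total = len(names_rev)
--     r = total % 6
--     groups = []
--     start = 0
--     if r != 0:
--         groups.append(names_rev[:r])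
--         start = r
--     while start < total:
--         groups.append(names_rev[start : start + 6])
--         start += 6
--     return groups
-- ===== SOURCE B (Python) =====
-- from typing import List
--
-- def partition_names(names: List[str]) -> List[List[str]]:
--     groups: List[List[str]] = []
--     current: List[str] = []
--     r = len(names) % 6
--     target = r if r != 0 else 6
--     for name in reversed(names):
--         current.append(name)
--         if len(current) == target:
--             groups.append(current)
--             current = []
--             target = 6
--     return groups
-- ===== Notes on version B (the rewrite author's own statement) =====
-- stated objective: alternative
-- what changed: Replaces index arithmetic over slices (remainder slice plus a while loop of 6-slices) with a single element-by-element pass over reversed(names) that accumulates a current group and flushes it when it reaches a dynamic target size (remainder first, then 6).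
import Mathlib
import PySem

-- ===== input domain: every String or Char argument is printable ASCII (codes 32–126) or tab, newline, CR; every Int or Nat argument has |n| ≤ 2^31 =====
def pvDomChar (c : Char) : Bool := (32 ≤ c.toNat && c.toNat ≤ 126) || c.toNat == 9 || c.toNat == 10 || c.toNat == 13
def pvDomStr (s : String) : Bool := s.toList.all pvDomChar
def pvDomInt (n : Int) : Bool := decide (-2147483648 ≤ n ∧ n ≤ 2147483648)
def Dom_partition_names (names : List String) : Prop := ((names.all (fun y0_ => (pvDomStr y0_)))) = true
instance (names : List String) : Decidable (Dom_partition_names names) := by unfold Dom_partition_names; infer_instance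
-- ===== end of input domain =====

-- B replaces A's slice/index arithmetic with one element-by-element pass that flushes a
-- current group when it reaches a dynamic target size (remainder first, then 6); same output.

-- ===== PORT A =====
-- the while loop: while start < total: groups.append(names_rev[start:start+6]); start += 6
def pnLoopA (rev : List String) (total start : Int) (groups : List (List String)) :
    List (List String) :=
  if start < total then
    pnLoopA rev total (start + 6) (groups ++ [PySem.List.slice rev (some start) (some (start + 6))])
  else groups
termination_by (total - start).toNat
decreasing_by omega

def partition_names (names : List String) : List (List String) :=
  let rev := (PySem.List.slice? names none none (-1)).getD []   -- names[::-1]; step -1 ≠ 0, never none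
  let total : Int := rev.length
  let r := PySem.Int.mod total 6
  let groups : List (List String) := []
  let start : Int := 0
  let (groups, start) :=
    if r ≠ 0 then (groups ++ [PySem.List.slice rev none (some r)], r) else (groups, start)
  pnLoopA rev total start groups

-- ===== PORT B =====
-- loop body: append name to current; if full, flush current into groups and reset target to 6
def pnStep (st : List (List String) × List String × Int) (name : String) :
    List (List String) × List String × Int :=
  let current := st.2.1 ++ [name]
  if (current.length : Int) = st.2.2 then (st.1 ++ [current], [], 6) else (st.1, current, st.2.2)

def partition_names_alt (names : List String) : List (List String) :=
  let r := PySem.Int.mod (names.length : Int) 6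
  let target : Int := if r ≠ 0 then r else 6
  (names.reverse.foldl pnStep ([], [], target)).1

-- ===== PRECONDITION & SPEC =====
def Spec_partition_names (names : List String) (out : List (List String)) : Prop := out = partition_names_alt names
instance (names : List String) (out : List (List String)) : Decidable (Spec_partition_names names out) := by unfold Spec_partition_names; infer_instance

-- ===== CLAIM (what is proved, stated in full; the proofs are below) =====
def Claim_equal_partition_names : Prop := ∀ (names : List String), Dom_partition_names names → Spec_partition_names names (partition_names names)

-- ===== LEMMAS AND PROOFS =====

-- common reference: chunks of six
def chunk6 : List String → List (List String)
  | [] => []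
  | x :: xs => ((x :: xs).take 6) :: chunk6 ((x :: xs).drop 6)
termination_by l => l.length
decreasing_by simp

theorem chunk6_nil : chunk6 [] = [] := by simp [chunk6]

theorem chunk6_cons (l : List String) (h : l ≠ []) :
    chunk6 l = l.take 6 :: chunk6 (l.drop 6) := by
  cases l with
  | nil => exact absurd rfl h
  | cons x xs => simp [chunk6]

-- A's while loop produces the 6-chunks of the unprocessed suffix
theorem pnLoopA_eq (k : Nat) : ∀ (rev : List String) (s : Nat) (groups : List (List String)),
    rev.length = s + 6 * k →
    pnLoopA rev (rev.length : Int) (s : Int) groups = groups ++ chunk6 (rev.drop s) := by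
  induction k with
  | zero =>
    intro rev s groups h
    rw [pnLoopA]
    have : ¬ ((s : Int) < (rev.length : Int)) := by omega
    simp [this, List.drop_of_length_le (by omega : rev.length ≤ s), chunk6_nil]
  | succ k ih =>
    intro rev s groups h
    rw [pnLoopA]
    have hlt : (s : Int) < (rev.length : Int) := by omega
    have hslice : PySem.List.slice rev (some (s : Int)) (some ((s : Int) + 6)) =
        (rev.drop s).take 6 := by
      have := PySem.List.slice_natCast_add rev s 6
      simpa using this
    have hcast : (s : Int) + 6 = ((s + 6 : Nat) : Int) := by push_cast; ring
    have hrec := ih rev (s + 6) (groups ++ [(rev.drop s).take 6]) (by omega)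
    have hne : rev.drop s ≠ [] := by
      intro hnil
      have := congrArg List.length hnil
      simp at this; omega
    rw [if_pos hlt, hslice, hcast, hrec]
    rw [chunk6_cons _ hne]
    simp [List.drop_drop]

-- B fills one group: consuming b (which completes current a up to target t) flushes a ++ b
theorem pnStep_fill : ∀ (b a : List String) (g : List (List String)) (t : Int)
    (rest : List String), ((a.length + b.length : Nat) : Int) = t → b ≠ [] →
    List.foldl pnStep (g, a, t) (b ++ rest) = List.foldl pnStep (g ++ [a ++ b], [], 6) rest := by
  intro b
  induction b with
  | nil => intro a g t rest h hne; exact absurd rfl hne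
  | cons x b' ih =>
    intro a g t rest h _
    simp only [List.cons_append, List.foldl_cons]
    by_cases hb' : b' = []
    · subst hb'
      have ht : ((a ++ [x]).length : Int) = t := by simp at h ⊢; omega
      simp only [pnStep, ht, if_pos]
      simp
    · have hlt : ¬ (((a ++ [x]).length : Nat) : Int) = t := by
        have hb : 0 < b'.length := List.length_pos_iff.mpr hb'
        simp at h ⊢; omega
      simp only [pnStep, if_neg hlt]
      have := ih (a ++ [x]) g t rest (by simp at h ⊢; omega) hb'
      simpa using this

-- B in steady state (empty current, target 6) produces the 6-chunks
theorem pnStep_chunks (k : Nat) : ∀ (l : List String) (g : List (List String)),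
    l.length = 6 * k →
    List.foldl pnStep (g, [], (6 : Int)) l = (g ++ chunk6 l, [], 6) := by
  induction k with
  | zero =>
    intro l g h
    have : l = [] := List.eq_nil_of_length_eq_zero (by omega)
    subst this
    simp [chunk6_nil]
  | succ k ih =>
    intro l g h
    have hne : l ≠ [] := by intro hnil; subst hnil; simp at h
    have hsplit : l = l.take 6 ++ l.drop 6 := (List.take_append_drop 6 l).symm
    have htl : (l.take 6).length = 6 := by simp; omega
    calc List.foldl pnStep (g, [], (6 : Int)) l
        = List.foldl pnStep (g, [], (6 : Int)) (l.take 6 ++ l.drop 6) := by rw [← hsplit]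
      _ = List.foldl pnStep (g ++ [[] ++ l.take 6], [], 6) (l.drop 6) := by
          apply pnStep_fill _ [] g 6 _ (by simp [htl]) (by intro hnil; simp [hnil] at htl)
      _ = (g ++ [l.take 6] ++ chunk6 (l.drop 6), [], 6) := by
          rw [ih (l.drop 6) _ (by simp; omega)]; simp
      _ = (g ++ chunk6 l, [], 6) := by rw [chunk6_cons l hne]; simp

-- both programs equal the chunk decomposition of names.reverse
theorem partition_names_eq_chunks (names : List String) :
    partition_names names =
      (if (names.length % 6 : Nat) ≠ 0 then [names.reverse.take (names.length % 6)] else []) ++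
        chunk6 (names.reverse.drop (names.length % 6)) := by
  unfold partition_names
  rw [PySem.List.slice?_none_none_neg_one]
  simp only [Option.getD_some]
  have hmod : PySem.Int.mod (names.reverse.length : Int) 6 = ((names.length % 6 : Nat) : Int) := by
    rw [List.length_reverse]
    exact_mod_cast PySem.Int.mod_natCast names.length 6
  rw [hmod]
  set n := names.length with hn
  set r := n % 6 with hr
  have hrlt : r < 6 := Nat.mod_lt _ (by omega)
  have hdecomp : names.reverse.length = r + 6 * (n / 6) := by
    rw [List.length_reverse, ← hn]; omega
  by_cases h0 : r = 0
  · simp only [h0, Nat.cast_zero, ne_eq, not_true_eq_false, if_false]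
    have := pnLoopA_eq (n / 6) names.reverse 0 [] (by omega)
    simpa using this
  · have hne : ((r : Nat) : Int) ≠ 0 := by exact_mod_cast h0
    simp only [ne_eq, hne, not_false_eq_true, if_true, h0]
    have hsl : PySem.List.slice names.reverse none (some ((r : Nat) : Int)) =
        names.reverse.take r := PySem.List.slice_to_natCast names.reverse r
    rw [hsl]
    exact pnLoopA_eq (n / 6) names.reverse r [names.reverse.take r] (by omega)

theorem partition_names_alt_eq_chunks (names : List String) :
    partition_names_alt names =
      (if (names.length % 6 : Nat) ≠ 0 then [names.reverse.take (names.length % 6)] else []) ++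
        chunk6 (names.reverse.drop (names.length % 6)) := by
  unfold partition_names_alt
  have hmod : PySem.Int.mod (names.length : Int) 6 = ((names.length % 6 : Nat) : Int) :=
    PySem.Int.mod_natCast names.length 6
  rw [hmod]
  set n := names.length with hn
  set r := n % 6 with hr
  have hrlt : r < 6 := Nat.mod_lt _ (by omega)
  have hlenrev : names.reverse.length = n := by simp [hn]
  by_cases h0 : r = 0
  · simp only [h0, Nat.cast_zero, ne_eq, not_true_eq_false, if_false]
    have := pnStep_chunks (n / 6) names.reverse [] (by omega)
    simp [this]
  · have hne : ((r : Nat) : Int) ≠ 0 := by exact_mod_cast h0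
    simp only [ne_eq, hne, not_false_eq_true, if_true, h0]
    have hsplit : names.reverse = names.reverse.take r ++ names.reverse.drop r :=
      (List.take_append_drop r names.reverse).symm
    have htl : (names.reverse.take r).length = r := by simp [hlenrev]; omega
    have h1 : List.foldl pnStep ([], [], ((r : Nat) : Int)) names.reverse =
        List.foldl pnStep ([[] ++ names.reverse.take r], [], 6) (names.reverse.drop r) := by
      conv_lhs => rw [hsplit]
      exact pnStep_fill (names.reverse.take r) [] [] ((r : Nat) : Int)
        (names.reverse.drop r) (by simp [htl]) (by intro hnil; simp [hnil] at htl; omega)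
    have h2 := pnStep_chunks (n / 6) (names.reverse.drop r) [[] ++ names.reverse.take r]
      (by simp [hlenrev]; omega)
    rw [h1, h2]
    simp

-- ===== VERDICT (by name: the statement is the Claim_ definition above) =====
theorem partition_names_spec : Claim_equal_partition_names := by
  intro names _
  unfold Spec_partition_names
  rw [partition_names_eq_chunks, partition_names_alt_eq_chunks]
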